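-- pv_equiv track=rewrite | github.com/Vado42-chris/00_xibalba_framework_blockchain | local-agent/agent.py | parse_cmd_file
-- ===== SOURCE A (Python) =====
-- from typing import List, Optional, Tuple
--
-- MAGIC_HEADER = "#hybrid-mode"
--
-- def parse_cmd_file(contents: str) -> Tuple[Optional[str], Optional[str], Optional[str]]:
--     """
--     Parse a .cmd file content.
--
--     Returns (secret_token, command_text, error_message).
--     command_text is the raw command payload after headers (may be JSON array or shell string).
--     """
--     lines = contents.splitlines()
--     if not lines:
--         return None, None, "empty file"
--
--     # Expect first non-empty line to be MAGIC_HEADER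
--     idx = 0
--     while idx < len(lines) and lines[idx].strip() == "":
--         idx += 1
--     if idx >= len(lines):
--         return None, None, "no content"
--
--     if not lines[idx].strip().startswith(MAGIC_HEADER):
--         return None, None, f"missing magic header {MAGIC_HEADER!r}"
--
--     idx += 1
--     secret = None
--     # parse optional SECRET_TOKEN lines until blank line
--     while idx < len(lines):
--         line = lines[idx]
--         if line.strip() == "":
--             idx += 1
--             break
--         if ":" in line:
--             key, val = line.split(":", 1)
--             if key.strip().upper() == "SECRET_TOKEN":
--                 secret = val.strip()
--         idx += 1
--
--     # remaining lines are command payload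
--     cmd_lines = lines[idx:]
--     cmd_text = "\n".join(cmd_lines).strip()
--     if not cmd_text:
--         return secret, None, "no command payload found"
--     return secret, cmd_text, None
-- ===== SOURCE B (Python) =====
-- from typing import List, Optional, Tuple
--
-- MAGIC_HEADER = "#hybrid-mode"
--
-- # B is a one-pass finite-state machine over the lines: state 0 = before the header
-- # (skipping blanks), 1 = inside the header block, 2 = inside the payload, 3 = bad
-- # magic header.  The secret and payload lines are accumulated in the state; the
-- # error cases are decided once, from the final state.
--
-- def _step(st, line):
--     mode, secret, payload = st
--     s = line.strip()
--     if mode == 0: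
--         if not s:
--             return st
--         return (1, secret, payload) if s.startswith(MAGIC_HEADER) else (3, secret, payload)
--     if mode == 1:
--         if not s:
--             return (2, secret, payload)
--         if ":" in line:
--             key, val = line.split(":", 1)
--             if key.strip().upper() == "SECRET_TOKEN":
--                 return (1, val.strip(), payload)
--         return st
--     if mode == 2:
--         return (2, secret, payload + [line])
--     return st
--
--
-- def parse_cmd_file(contents):
--     lines = contents.splitlines()
--     if not lines:
--         return None, None, "empty file"
--     st = (0, None, [])
--     for line in lines:
--         st = _step(st, line)
--     mode, secret, payload = st
--     if mode == 0:
--         return None, None, "no content"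
--     if mode == 3:
--         return None, None, f"missing magic header {MAGIC_HEADER!r}"
--     cmd_text = "\n".join(payload).strip()
--     if not cmd_text:
--         return secret, None, "no command payload found"
--     return secret, cmd_text, None
-- ===== Notes on version B (the rewrite author's own statement) =====
-- stated objective: alternative
-- what changed: B replaces A's three staged cursor loops and list slicing by a single-pass finite-state-machine fold over the lines (states: before-header / header / payload / bad-header) that accumulates the secret and the payload lines in the state and decides every error case once from the final state.
import Mathlib
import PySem

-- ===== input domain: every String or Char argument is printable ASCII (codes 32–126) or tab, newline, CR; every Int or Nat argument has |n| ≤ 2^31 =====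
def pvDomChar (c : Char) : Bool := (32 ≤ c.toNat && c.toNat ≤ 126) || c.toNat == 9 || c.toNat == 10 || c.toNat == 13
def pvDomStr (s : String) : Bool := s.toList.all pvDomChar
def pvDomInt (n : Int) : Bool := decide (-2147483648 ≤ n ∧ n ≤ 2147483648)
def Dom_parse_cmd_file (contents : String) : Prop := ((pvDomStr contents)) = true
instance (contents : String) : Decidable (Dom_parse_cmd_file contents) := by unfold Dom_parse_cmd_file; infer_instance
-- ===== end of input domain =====

-- B replaces A's three staged cursor loops and slicing by one fold of a finite-state machine
-- over the lines, accumulating secret and payload in the state; same cost, different structure.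

def pvMagic : String := "#hybrid-mode"

-- ===== PORT A =====
-- A's first while loop: skip leading blank lines.
def pvSkipBlanks (lines : List String) (idx : Nat) : Nat :=
  if idx < lines.length then
    if PySem.Str.strip (lines.getD idx "") = "" then pvSkipBlanks lines (idx + 1) else idx
  else idx
termination_by lines.length - idx

-- body of A's second while loop (the secret update for one line)
def pvStepA (secret : Option String) (line : String) : Option String :=
  if PySem.Str.isIn ":" line then
    -- key, val = line.split(":", 1): ':' is in line, so split yields exactly [key, val]
    let parts := (PySem.Str.splitMax? line ":" 1).getD []
    let key := parts.getD 0 ""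
    let val := parts.getD 1 ""
    if PySem.Str.upper (PySem.Str.strip key) = "SECRET_TOKEN" then some (PySem.Str.strip val)
    else secret
  else secret

-- A's second while loop: scan header lines until a blank line, returning (secret, idx).
def pvHeaderLoop (lines : List String) (idx : Nat) (secret : Option String) : Option String × Nat :=
  if idx < lines.length then
    let line := lines.getD idx ""
    if PySem.Str.strip line = "" then (secret, idx + 1)
    else pvHeaderLoop lines (idx + 1) (pvStepA secret line)
  else (secret, idx)
termination_by lines.length - idx

def parse_cmd_file (contents : String) : Option String × Option String × Option String :=
  let lines := PySem.Str.splitlines contents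
  if lines = [] then (none, none, some "empty file")
  else
    let idx := pvSkipBlanks lines 0
    if lines.length ≤ idx then (none, none, some "no content")
    else if ¬ (PySem.Str.startswith (PySem.Str.strip (lines.getD idx "")) pvMagic = true) then
      (none, none, some "missing magic header '#hybrid-mode'")
    else
      let r := pvHeaderLoop lines (idx + 1) none
      let cmd_lines := lines.drop r.2
      let cmd_text := PySem.Str.strip (PySem.Str.join "\n" cmd_lines)
      if cmd_text = "" then (r.1, none, some "no command payload found")
      else (r.1, some cmd_text, none)

-- ===== PORT B =====
-- B's _step helper: one transition of the state machine.
-- state = (mode, secret, payload): 0 before header, 1 header block, 2 payload, 3 bad header.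
def pvStepB (st : Nat × Option String × List String) (line : String) :
    Nat × Option String × List String :=
  let s := PySem.Str.strip line
  if st.1 = 0 then
    if s = "" then st
    else if PySem.Str.startswith s pvMagic then (1, st.2.1, st.2.2) else (3, st.2.1, st.2.2)
  else if st.1 = 1 then
    if s = "" then (2, st.2.1, st.2.2)
    else if PySem.Str.isIn ":" line then
      -- key, val = line.split(":", 1): ':' is in line, so split yields exactly [key, val]
      let parts := (PySem.Str.splitMax? line ":" 1).getD []
      let key := parts.getD 0 ""
      let val := parts.getD 1 ""
      if PySem.Str.upper (PySem.Str.strip key) = "SECRET_TOKEN" then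
        (1, some (PySem.Str.strip val), st.2.2)
      else st
    else st
  else if st.1 = 2 then (2, st.2.1, st.2.2 ++ [line])
  else st

def parse_cmd_file_alt (contents : String) : Option String × Option String × Option String :=
  let lines := PySem.Str.splitlines contents
  if lines = [] then (none, none, some "empty file")
  else
    let r := lines.foldl pvStepB (0, none, [])
    if r.1 = 0 then (none, none, some "no content")
    else if r.1 = 3 then (none, none, some "missing magic header '#hybrid-mode'")
    else
      let cmd_text := PySem.Str.strip (PySem.Str.join "\n" r.2.2)
      if cmd_text = "" then (r.2.1, none, some "no command payload found")
      else (r.2.1, some cmd_text, none)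

-- ===== PRECONDITION & SPEC =====
def Spec_parse_cmd_file (contents : String) (out : Option String × Option String × Option String) : Prop := out = parse_cmd_file_alt contents
instance (contents : String) (out : Option String × Option String × Option String) : Decidable (Spec_parse_cmd_file contents out) := by unfold Spec_parse_cmd_file; infer_instance

-- ===== CLAIM (what is proved, stated in full; the proofs are below) =====
def Claim_equal_parse_cmd_file : Prop := ∀ (contents : String), Dom_parse_cmd_file contents → Spec_parse_cmd_file contents (parse_cmd_file contents)

-- ===== LEMMAS AND PROOFS =====

lemma pvSkip_drop (lines : List String) : ∀ n idx, lines.length - idx = n →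
    lines.drop (pvSkipBlanks lines idx) = (lines.drop idx).dropWhile (fun l => PySem.Str.strip l == "") := by
  intro n
  induction n with
  | zero =>
    intro idx h
    rw [pvSkipBlanks]
    have hle : lines.length ≤ idx := by omega
    simp [Nat.not_lt.mpr hle, List.drop_eq_nil_of_le hle]
  | succ m ih =>
    intro idx h
    rw [pvSkipBlanks]
    have hlt : idx < lines.length := by omega
    have hd : lines.drop idx = lines[idx] :: lines.drop (idx + 1) :=
      List.drop_eq_getElem_cons hlt
    have hget : lines.getD idx "" = lines[idx] := by
      simp [List.getD_eq_getElem?_getD, List.getElem?_eq_getElem hlt]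
    by_cases hb : PySem.Str.strip lines[idx] = ""
    · simp only [hlt, if_true, hget, hb]
      rw [ih (idx + 1) (by omega), hd, List.dropWhile_cons]
      simp [hb]
    · simp only [hlt, if_true, hget, if_neg hb]
      rw [hd, List.dropWhile_cons]
      simp [hb, ← hd]

lemma pvHeader_spec (lines : List String) : ∀ n idx secret, lines.length - idx = n → idx ≤ lines.length →
    pvHeaderLoop lines idx secret =
      (((lines.drop idx).takeWhile (fun l => !(PySem.Str.strip l == ""))).foldl pvStepA secret,
       min (idx + ((lines.drop idx).takeWhile (fun l => !(PySem.Str.strip l == ""))).length + 1) lines.length) := by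
  intro n
  induction n with
  | zero =>
    intro idx secret h hle
    have : idx = lines.length := by omega
    subst this
    rw [pvHeaderLoop]
    simp
  | succ m ih =>
    intro idx secret h hle
    have hlt : idx < lines.length := by omega
    have hd : lines.drop idx = lines[idx] :: lines.drop (idx + 1) :=
      List.drop_eq_getElem_cons hlt
    have hget : lines.getD idx "" = lines[idx] := by
      simp [List.getD_eq_getElem?_getD, List.getElem?_eq_getElem hlt]
    rw [pvHeaderLoop, hd]
    by_cases hb : PySem.Str.strip lines[idx] = ""
    · simp only [hlt, if_true, hget, hb, List.takeWhile_cons]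
      simp
      omega
    · simp only [hlt, if_true, hget, if_neg hb, List.takeWhile_cons]
      rw [ih (idx + 1) (pvStepA secret lines[idx]) (by omega) (by omega)]
      simp [hb]
      omega

lemma pvDrop_min (lines : List String) (k : Nat) :
    lines.drop (min k lines.length) = lines.drop k := by
  rcases Nat.le_total k lines.length with h | h
  · rw [Nat.min_eq_left h]
  · rw [Nat.min_eq_right h, List.drop_eq_nil_of_le h, List.drop_eq_nil_of_le (le_refl _)]

-- state 3 is absorbing
lemma pvFold_mode3 : ∀ (L : List String) (s : Option String) (p : List String),
    L.foldl pvStepB (3, s, p) = (3, s, p) := by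
  intro L
  induction L with
  | nil => intro s p; rfl
  | cons l L ih =>
    intro s p
    have hstep : pvStepB (3, s, p) l = (3, s, p) := by simp [pvStepB]
    rw [List.foldl_cons, hstep, ih]

-- in state 2 every remaining line is appended to the payload
lemma pvFold_mode2 : ∀ (L : List String) (s : Option String) (p : List String),
    L.foldl pvStepB (2, s, p) = (2, s, p ++ L) := by
  intro L
  induction L with
  | nil => intro s p; simp
  | cons l L ih =>
    intro s p
    have hstep : pvStepB (2, s, p) l = (2, s, p ++ [l]) := by simp [pvStepB]
    rw [List.foldl_cons, hstep, ih]
    simp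

-- blank lines leave state 0 unchanged
lemma pvFold_blanks : ∀ (L : List String) (s : Option String) (p : List String),
    (∀ x ∈ L, PySem.Str.strip x = "") → L.foldl pvStepB (0, s, p) = (0, s, p) := by
  intro L
  induction L with
  | nil => intro s p _; rfl
  | cons l L ih =>
    intro s p h
    have hb : PySem.Str.strip l = "" := h l (by simp)
    have hstep : pvStepB (0, s, p) l = (0, s, p) := by simp [pvStepB, hb]
    rw [List.foldl_cons, hstep, ih s p (fun x hx => h x (List.mem_cons_of_mem _ hx))]

-- a non-blank line in state 1 performs exactly A's secret update
lemma pvStepB_one (s : Option String) (p : List String) (line : String)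
    (h : ¬ PySem.Str.strip line = "") :
    pvStepB (1, s, p) line = (1, pvStepA s line, p) := by
  simp only [pvStepB, pvStepA]
  split_ifs <;> simp_all

-- the fold from state 1: header block folded with pvStepA, then the payload lines collected
lemma pvFold_mode1 : ∀ (L : List String) (s : Option String) (p : List String),
    L.foldl pvStepB (1, s, p) =
      ((if L.takeWhile (fun l => !(PySem.Str.strip l == "")) = L then 1 else 2),
       (L.takeWhile (fun l => !(PySem.Str.strip l == ""))).foldl pvStepA s,
       p ++ L.drop ((L.takeWhile (fun l => !(PySem.Str.strip l == ""))).length + 1)) := by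
  intro L
  induction L with
  | nil => intro s p; simp
  | cons l L ih =>
    intro s p
    by_cases hb : PySem.Str.strip l = ""
    · have hstep : pvStepB (1, s, p) l = (2, s, p) := by simp [pvStepB, hb]
      rw [List.foldl_cons, hstep, pvFold_mode2, List.takeWhile_cons]
      simp [hb]
    · rw [List.foldl_cons, pvStepB_one s p l hb, ih, List.takeWhile_cons]
      have hb' : (PySem.Str.strip l == "") = false := by simpa using hb
      simp [hb']

-- ===== VERDICT (by name: the statement is the Claim_ definition above) =====
theorem parse_cmd_file_spec : Claim_equal_parse_cmd_file := by
  intro contents _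
  unfold Spec_parse_cmd_file parse_cmd_file parse_cmd_file_alt
  set L := PySem.Str.splitlines contents with hL
  by_cases hnil : L = []
  · simp [hnil]
  · simp only [hnil, if_false]
    set s := pvSkipBlanks L 0 with hs
    have hdrop : L.drop s = L.dropWhile (fun l => PySem.Str.strip l == "") := by
      have := pvSkip_drop L (L.length - 0) 0 rfl
      simpa using this
    have hfold0 : L.foldl pvStepB (0, none, []) =
        (L.dropWhile (fun l => PySem.Str.strip l == "")).foldl pvStepB (0, none, []) := by
      conv_lhs => rw [← List.takeWhile_append_dropWhile
        (p := fun l => PySem.Str.strip l == "") (l := L)]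
      rw [List.foldl_append, pvFold_blanks]
      intro x hx
      have := List.mem_takeWhile_imp hx
      simpa using this
    rcases hrest : L.dropWhile (fun l => PySem.Str.strip l == "") with _ | ⟨first, body⟩
    · -- no content branch
      have hfold : L.foldl pvStepB (0, none, []) = (0, none, []) := by
        rw [hfold0, hrest]; rfl
      have : L.drop s = [] := by rw [hdrop, hrest]
      have hge : L.length ≤ s := List.drop_eq_nil_iff.mp this
      simp [hge, hfold]
    · -- header present
      have hds : L.drop s = first :: body := by rw [hdrop, hrest]
      have hne : L.dropWhile (fun l => PySem.Str.strip l == "") ≠ [] := by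
        rw [hrest]; simp
      have hfb : ¬ PySem.Str.strip first = "" := by
        have hhead : (L.dropWhile (fun l => PySem.Str.strip l == "")).head hne = first := by
          simp [hrest]
        have := List.head_dropWhile_not (fun l => PySem.Str.strip l == "") hne
        rw [hhead] at this
        simpa using this
      have hslt : s < L.length := by
        by_contra hc
        have : L.drop s = [] := List.drop_eq_nil_of_le (by omega)
        rw [hds] at this; cases this
      have hget : L.getD s "" = first := by
        have h0 : (L.drop s)[0]? = L[s]? := by
          simp [List.getElem?_drop]
        rw [hds] at h0
        simp at h0
        simp [List.getD_eq_getElem?_getD, ← h0]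
      have hbody : L.drop (s + 1) = body := by
        have : (L.drop s).drop 1 = L.drop (s + 1) := by
          rw [List.drop_drop]
        rw [hds] at this
        simpa using this.symm
      have hfold : L.foldl pvStepB (0, none, []) =
          body.foldl pvStepB (pvStepB (0, none, []) first) := by
        rw [hfold0, hrest, List.foldl_cons]
      simp only [Nat.not_le.mpr hslt, if_false, hget]
      by_cases hm : PySem.Str.startswith (PySem.Str.strip first) pvMagic = true
      · simp only [hm, not_true, if_false]
        have hm' : PySem.Chars.startswith (PySem.Chars.strip first.toList) pvMagic.toList = true := by
          simpa using hm
        have hstep : pvStepB (0, none, []) first = (1, none, []) := by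
          simp [pvStepB, hfb, hm']
        rw [hstep, pvFold_mode1] at hfold
        set header := body.takeWhile (fun l => !(PySem.Str.strip l == "")) with hh
        have hspec := pvHeader_spec L (L.length - (s + 1)) (s + 1) none rfl (by omega)
        rw [hbody] at hspec
        have hsec : (pvHeaderLoop L (s + 1) none).1 = header.foldl pvStepA none := by
          rw [hspec]
        have hpay : L.drop (pvHeaderLoop L (s + 1) none).2 = body.drop (header.length + 1) := by
          rw [hspec]
          simp only
          rw [pvDrop_min]
          have : s + 1 + header.length + 1 = (s + 1) + (header.length + 1) := by omega
          rw [this, ← List.drop_drop, hbody]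
        rw [hfold]
        by_cases hcond : header = body
        · simp [hsec, hpay, hcond]
        · simp [hsec, hpay, hcond]
      · have hf : PySem.Chars.startswith (PySem.Chars.strip first.toList) pvMagic.toList = false := by
          simpa using hm
        have hstep : pvStepB (0, none, []) first = (3, none, []) := by
          simp [pvStepB, hfb, hf]
        rw [hstep, pvFold_mode3] at hfold
        simp [hf, hfold]
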